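-- pv_equiv track=rewrite | github.com/AbubakrSultan/hangman-game | give_answer.py | get_masked_word
-- ===== SOURCE A (Python) =====
-- def get_masked_word(original_word, masked_word, character=None):
--     positions = []
--     for i in range(len(original_word)):
--         for pos, char in enumerate(original_word):
--             if char == character:
--                 positions.append(pos)
--
--     new_word = ''
--     p = 0
--     for i in masked_word:
--         if p in positions:
--             new_word += character
--         else:
--             new_word += i
--         p += 1
--
--     return new_word
-- ===== SOURCE B (Python) =====
-- def get_masked_word(original_word, masked_word, character=None):
--     return ''.join(
--         character if p < len(original_word) and original_word[p] == character else m
--         for p, m in enumerate(masked_word)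
--     )
-- ===== Notes on version B (the rewrite author's own statement) =====
-- stated objective: simpler
-- what changed: Drops A's positions list (built by a redundant quadratic double loop over original_word) and the manual counter; B is one guarded pass over enumerate(masked_word) that compares original_word[p] to the guessed character directly.
import Mathlib
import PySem

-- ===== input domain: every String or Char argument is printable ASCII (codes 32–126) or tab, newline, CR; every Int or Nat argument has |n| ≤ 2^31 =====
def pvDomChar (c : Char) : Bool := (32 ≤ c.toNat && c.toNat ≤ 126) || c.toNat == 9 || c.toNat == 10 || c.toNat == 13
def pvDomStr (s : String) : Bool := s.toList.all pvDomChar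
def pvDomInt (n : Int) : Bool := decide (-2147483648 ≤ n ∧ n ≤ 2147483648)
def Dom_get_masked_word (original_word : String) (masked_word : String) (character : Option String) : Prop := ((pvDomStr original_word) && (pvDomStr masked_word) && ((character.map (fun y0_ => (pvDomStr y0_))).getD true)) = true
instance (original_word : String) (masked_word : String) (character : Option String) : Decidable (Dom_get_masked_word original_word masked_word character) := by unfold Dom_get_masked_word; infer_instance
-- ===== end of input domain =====

-- B replaces A's quadratic positions pre-pass and counter loop by one guarded pass over enumerate(masked_word): simpler decomposition.

-- ===== PORT A =====
-- `char == character` in Python: character may be None (never equal) or a string.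
def pvMatch (ch : Option String) (c : Char) : Bool :=
  match ch with
  | none => false
  | some s => s == String.ofList [c]

-- chars appended by `new_word += character` (only reached when character is a 1-char string)
def pvChChars (ch : Option String) : List Char :=
  match ch with
  | none => []
  | some s => s.toList

def get_masked_word (original_word : String) (masked_word : String) (character : Option String) : String :=
  let positions : List Nat :=
    (List.range original_word.toList.length).foldl
      (fun acc _ =>
        (original_word.toList.zipIdx).foldl
          (fun a cp => if pvMatch character cp.1 then a ++ [cp.2] else a) acc) []
  let r := masked_word.toList.foldl
    (fun (st : List Char × Nat) i =>
      (if st.2 ∈ positions then st.1 ++ pvChChars character else st.1 ++ [i], st.2 + 1))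
    ([], 0)
  String.ofList r.1

-- ===== PORT B =====
def get_masked_word_alt (original_word : String) (masked_word : String) (character : Option String) : String :=
  String.ofList ((masked_word.toList.zipIdx).flatMap
    (fun mp =>
      if mp.2 < original_word.toList.length && pvMatch character (original_word.toList.getD mp.2 ' ')
      then pvChChars character else [mp.1]))

-- ===== PRECONDITION & SPEC =====
def Spec_get_masked_word (original_word : String) (masked_word : String) (character : Option String) (out : String) : Prop := out = get_masked_word_alt original_word masked_word character
instance (original_word : String) (masked_word : String) (character : Option String) (out : String) : Decidable (Spec_get_masked_word original_word masked_word character out) := by unfold Spec_get_masked_word; infer_instance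

-- ===== CLAIM (what is proved, stated in full; the proofs are below) =====
def Claim_equal_get_masked_word : Prop := ∀ (original_word : String) (masked_word : String) (character : Option String), Dom_get_masked_word original_word masked_word character → Spec_get_masked_word original_word masked_word character (get_masked_word original_word masked_word character)

-- ===== LEMMAS AND PROOFS =====

-- A's inner enumerate pass appends exactly the matching positions.
theorem inner_foldl_eq (ch : Option String) (l : List (Char × Nat)) (acc : List Nat) :
    l.foldl (fun a cp => if pvMatch ch cp.1 then a ++ [cp.2] else a) acc
      = acc ++ (l.filter (fun cp => pvMatch ch cp.1)).map Prod.snd := by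
  induction l generalizing acc with
  | nil => simp
  | cons x xs ih =>
    simp only [List.foldl_cons, List.filter_cons]
    by_cases h : pvMatch ch x.1
    · simp [h, ih]
    · simp [h, ih]

-- repeated concatenation over range n
theorem rep_foldl (M : List Nat) (n : ℕ) (init : List Nat) :
    (List.range n).foldl (fun acc _ => acc ++ M) init = init ++ (List.replicate n M).flatten := by
  induction n generalizing init with
  | zero => simp
  | succ m ih =>
    rw [List.range_succ, List.foldl_append]
    simp [ih, List.replicate_succ']

-- membership in A's positions list after n outer iterations
theorem mem_positions (ch : Option String) (e : List (Char × Nat)) (n p : ℕ) :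
    p ∈ (List.range n).foldl
        (fun acc _ => e.foldl (fun a cp => if pvMatch ch cp.1 then a ++ [cp.2] else a) acc) []
      ↔ (0 < n ∧ p ∈ (e.filter (fun cp => pvMatch ch cp.1)).map Prod.snd) := by
  simp only [inner_foldl_eq, rep_foldl]
  simp only [List.nil_append, List.mem_flatten, List.mem_replicate]
  constructor
  · rintro ⟨l, ⟨hn, rfl⟩, hp⟩; exact ⟨Nat.pos_of_ne_zero hn, hp⟩
  · rintro ⟨hn, hp⟩; exact ⟨_, ⟨Nat.pos_iff_ne_zero.1 hn, rfl⟩, hp⟩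

-- position membership as a direct predicate on the list of chars
theorem mem_matchpos (ch : Option String) (l : List Char) (p : ℕ) :
    (p ∈ (l.zipIdx.filter (fun cp => pvMatch ch cp.1)).map Prod.snd)
      ↔ (p < l.length ∧ pvMatch ch (l.getD p ' ') = true) := by
  simp only [List.mem_map, List.mem_filter]
  constructor
  · rintro ⟨⟨c, q⟩, ⟨hmem, hm⟩, rfl⟩
    have h := List.mem_zipIdx_iff_getElem?.1 hmem
    have hlt : q < l.length := by
      by_contra hge
      rw [List.getElem?_eq_none (by omega)] at h
      simp at h
    refine ⟨hlt, ?_⟩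
    have hc : l.getD q ' ' = c := by simp [List.getD_eq_getElem?_getD, h]
    rw [hc]; exact hm
  · rintro ⟨hlt, hm⟩
    refine ⟨(l[p], p), ⟨List.mem_zipIdx_iff_getElem?.2 (by simp), ?_⟩, rfl⟩
    have hc : l.getD p ' ' = l[p] := by
      simp [List.getD_eq_getElem?_getD, List.getElem?_eq_getElem hlt]
    rw [hc] at hm; exact hm

-- A's main loop from an arbitrary start produces B's flatMap over zipIdx
theorem main_loop_eq (positions : List Nat) (ch : Option String) (l : List Char)
    (s : List Char) (p0 : ℕ) :
    (l.foldl (fun (st : List Char × Nat) i =>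
        (if st.2 ∈ positions then st.1 ++ pvChChars ch else st.1 ++ [i], st.2 + 1)) (s, p0)).1
      = s ++ (l.zipIdx p0).flatMap
          (fun mp => if mp.2 ∈ positions then pvChChars ch else [mp.1]) := by
  induction l generalizing s p0 with
  | nil => simp
  | cons x xs ih =>
    simp only [List.foldl_cons, List.zipIdx_cons, List.flatMap_cons]
    by_cases h : p0 ∈ positions
    · simp [h, ih, List.append_assoc]
    · simp [h, ih, List.append_assoc]

-- ===== VERDICT (by name: the statement is the Claim_ definition above) =====
theorem get_masked_word_spec : Claim_equal_get_masked_word := by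
  intro ow mw ch _
  unfold Spec_get_masked_word get_masked_word get_masked_word_alt
  simp only [main_loop_eq]
  simp only [List.nil_append]
  congr 1
  apply List.flatMap_congr
  intro mp _
  simp only [mem_positions, mem_matchpos]
  split_ifs with hA hB hC
  · rfl
  · simp only [Bool.and_eq_true, decide_eq_true_eq] at hB
    exact absurd hA.2 hB
  · simp only [Bool.and_eq_true, decide_eq_true_eq] at hC
    exact absurd ⟨Nat.zero_lt_of_lt hC.1, hC⟩ hA
  · rfl
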